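-- pv_equiv track=rewrite | github.com/armaanpatelofficial/AI-Smart-Waste-Management | Ai_Models/yolo_waste_server.py | map_class
-- ===== SOURCE A (Python) =====
-- def map_class(raw_name: str) -> str:
--     """Map raw YOLO class label to one of the standard waste types."""
--     name = raw_name.lower().strip()
--     if name in ("biodegradable",) or any(k in name for k in ("bio", "organic", "food", "green", "vegeta", "fruit")):
--         return "Biodegradable"
--     if name in ("recyclable",) or any(k in name for k in ("recycl", "plastic", "paper", "metal", "glass", "card", "bottle", "can")):
--         return "Recyclable"
--     if name in ("hazardous",) or any(k in name for k in ("hazard", "toxic", "battery", "chemical", "medical", "e-waste", "ewaste")):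
--         return "Hazardous"
--     return "Mixed"
-- ===== SOURCE B (Python) =====
-- _RANK = {
--     "bio": 0, "organic": 0, "food": 0, "green": 0, "vegeta": 0, "fruit": 0,
--     "recycl": 1, "plastic": 1, "paper": 1, "metal": 1, "glass": 1, "card": 1,
--     "bottle": 1, "can": 1,
--     "hazard": 2, "toxic": 2, "battery": 2, "chemical": 2, "medical": 2,
--     "e-waste": 2, "ewaste": 2,
-- }
-- _CATS = ("Biodegradable", "Recyclable", "Hazardous", "Mixed")
--
--
-- def map_class(raw_name: str) -> str:
--     """Map raw YOLO class label to one of the standard waste types.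
--
--     Single scan over the start positions of the cleaned name, keeping the
--     minimum category rank of any keyword found anchored at a position.
--     """
--     name = raw_name.lower().strip()
--     best = 3
--     for i in range(len(name)):
--         for kw, r in _RANK.items():
--             if r < best and name.startswith(kw, i):
--                 best = r
--     return _CATS[best]
-- ===== Notes on version B (the rewrite author's own statement) =====
-- stated objective: alternative
-- what changed: Instead of testing each category's keyword list with substring searches in three unrolled branches, B makes a single scan over the start positions of the cleaned name, keeping the minimum category rank of any keyword anchored at a position (a keyword-to-rank map plus a min accumulator), and indexes the category tuple with that rank.
import Mathlib
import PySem

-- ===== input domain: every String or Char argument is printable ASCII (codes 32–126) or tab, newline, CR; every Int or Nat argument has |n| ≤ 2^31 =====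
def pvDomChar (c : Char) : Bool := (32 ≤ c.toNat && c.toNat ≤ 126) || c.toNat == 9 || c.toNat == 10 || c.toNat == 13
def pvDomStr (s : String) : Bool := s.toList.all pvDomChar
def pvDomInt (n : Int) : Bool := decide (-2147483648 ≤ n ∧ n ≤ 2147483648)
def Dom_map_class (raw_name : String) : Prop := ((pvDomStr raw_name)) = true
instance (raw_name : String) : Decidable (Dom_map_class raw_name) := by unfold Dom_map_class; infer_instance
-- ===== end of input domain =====

-- B replaces A's three per-category substring branches by a single scan over the start
-- positions of the cleaned name, keeping the minimum category rank of any keyword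
-- anchored there (alternative decomposition; same asymptotic cost).


-- ===== PORT A =====
def map_class (raw_name : String) : String :=
  let name := PySem.Str.strip (PySem.Str.lower raw_name)
  if name == "biodegradable" ||
      (["bio", "organic", "food", "green", "vegeta", "fruit"].any fun k => PySem.Str.isIn k name) then
    "Biodegradable"
  else if name == "recyclable" ||
      (["recycl", "plastic", "paper", "metal", "glass", "card", "bottle", "can"].any fun k => PySem.Str.isIn k name) then
    "Recyclable"
  else if name == "hazardous" ||
      (["hazard", "toxic", "battery", "chemical", "medical", "e-waste", "ewaste"].any fun k => PySem.Str.isIn k name) then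
    "Hazardous"
  else
    "Mixed"

-- ===== PORT B =====
-- the _RANK dict of Source B, in insertion order (keywords as char lists, values = category rank)
def rankTable : List (List Char × Nat) :=
  [("bio".toList, 0), ("organic".toList, 0), ("food".toList, 0), ("green".toList, 0),
   ("vegeta".toList, 0), ("fruit".toList, 0),
   ("recycl".toList, 1), ("plastic".toList, 1), ("paper".toList, 1), ("metal".toList, 1),
   ("glass".toList, 1), ("card".toList, 1), ("bottle".toList, 1), ("can".toList, 1),
   ("hazard".toList, 2), ("toxic".toList, 2), ("battery".toList, 2), ("chemical".toList, 2),
   ("medical".toList, 2), ("e-waste".toList, 2), ("ewaste".toList, 2)]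

def catNames : List String := ["Biodegradable", "Recyclable", "Hazardous", "Mixed"]

-- name.startswith(kw, i) for 0 ≤ i ≤ len(name) is exactly: kw is a prefix of the i-th suffix
def map_class_alt (raw_name : String) : String :=
  let name := (PySem.Str.strip (PySem.Str.lower raw_name)).toList
  let best := (List.range name.length).foldl
    (fun b i => rankTable.foldl
      (fun b p => if p.2 < b && PySem.Chars.startswith (name.drop i) p.1 then p.2 else b) b) 3
  catNames.getD best "Mixed"   -- _CATS[best]; best ≤ 3 always, so the index is in range

-- ===== PRECONDITION & SPEC =====
def Spec_map_class (raw_name : String) (out : String) : Prop := out = map_class_alt raw_name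
instance (raw_name : String) (out : String) : Decidable (Spec_map_class raw_name out) := by unfold Spec_map_class; infer_instance

-- ===== CLAIM (what is proved, stated in full; the proofs are below) =====
def Claim_equal_map_class : Prop := ∀ (raw_name : String), Dom_map_class raw_name → Spec_map_class raw_name (map_class raw_name)

-- ===== LEMMAS AND PROOFS =====

-- the conditional-update step is a conditional min
theorem step_eq_min (b r : Nat) (c : Bool) :
    (if r < b && c then r else b) = (if c then min b r else b) := by
  cases c
  · simp
  · simp only [Bool.and_true]
    by_cases h : r < b
    · simp [h, Nat.min_def]
    · simp [h, Nat.min_def]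

-- generic spec of a fold of conditional mins
theorem foldl_condmin_spec {α : Type} (P : α → Bool) (rk : α → Nat) :
    ∀ (L : List α) (b : Nat),
      (L.foldl (fun b q => if P q then min b (rk q) else b) b ≤ b) ∧
      (∀ q ∈ L, P q = true → L.foldl (fun b q => if P q then min b (rk q) else b) b ≤ rk q) ∧
      (L.foldl (fun b q => if P q then min b (rk q) else b) b = b ∨
        ∃ q ∈ L, P q = true ∧ L.foldl (fun b q => if P q then min b (rk q) else b) b = rk q) := by
  intro L
  induction L with
  | nil => intro b; simp
  | cons a t ih =>
    intro b
    obtain ⟨h1, h2, h3⟩ := ih (if P a then min b (rk a) else b)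
    refine ⟨?_, ?_, ?_⟩
    · exact le_trans h1 (by split <;> omega)
    · intro q hq hPq
      rcases List.mem_cons.mp hq with rfl | hmem
      · refine le_trans h1 ?_
        simp only [hPq, if_true]
        omega
      · exact h2 q hmem hPq
    · rcases h3 with h | ⟨q, hq, hPq, hval⟩
      · by_cases hPa : P a = true
        · rcases Nat.le_total b (rk a) with hba | hba
          · refine Or.inl ?_
            rw [List.foldl_cons]
            simp only [hPa, if_true, Nat.min_eq_left hba] at h ⊢
            exact h
          · refine Or.inr ⟨a, List.mem_cons_self, hPa, ?_⟩
            rw [List.foldl_cons]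
            simp only [hPa, if_true, Nat.min_eq_right hba] at h ⊢
            exact h
        · simp only [Bool.not_eq_true] at hPa
          refine Or.inl ?_
          rw [List.foldl_cons]
          simp only [hPa] at h ⊢
          exact h
      · exact Or.inr ⟨q, List.mem_cons_of_mem _ hq, hPq, by rw [List.foldl_cons]; exact hval⟩

-- a nonempty pattern occurs in s iff it is anchored at some position i < s.length
theorem anchored_iff_isIn (kw s : List Char) (hkw : kw ≠ []) :
    (∃ i ∈ List.range s.length, PySem.Chars.startswith (s.drop i) kw = true) ↔
      PySem.Chars.isIn kw s = true := by
  rw [← PySem.Chars.exists_prefix_drop_iff_isIn]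
  constructor
  · rintro ⟨i, _, h⟩
    exact ⟨i, (PySem.Chars.startswith_iff _ _).mp h⟩
  · rintro ⟨j, hj⟩
    refine ⟨j, ?_, (PySem.Chars.startswith_iff _ _).mpr hj⟩
    rw [List.mem_range]
    by_contra hge
    push Not at hge
    have : s.drop j = [] := List.drop_eq_nil_of_le hge
    rw [this] at hj
    exact hkw (List.prefix_nil.mp hj)

-- which ranks occur: some keyword of rank r of the table occurs as a substring of cs
def occB (r : Nat) (cs : List Char) : Bool :=
  rankTable.any (fun p => p.2 == r && PySem.Chars.isIn p.1 cs)

theorem rankTable_nonempty_keys : ∀ p ∈ rankTable, p.1 ≠ [] := by decide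

theorem rankTable_rank_le : ∀ p ∈ rankTable, p.2 ≤ 2 := by decide

-- the occurrence predicate matches membership in the flattened (suffix, table-entry) list
theorem occB_iff (r : Nat) (cs : List Char) :
    occB r cs = true ↔
      ∃ q ∈ (List.range cs.length).flatMap (fun i => rankTable.map (fun p => (cs.drop i, p))),
        PySem.Chars.startswith q.1 q.2.1 = true ∧ q.2.2 = r := by
  unfold occB
  rw [List.any_eq_true]
  constructor
  · rintro ⟨p, hp, hcond⟩
    rw [Bool.and_eq_true, beq_iff_eq] at hcond
    obtain ⟨hr, hin⟩ := hcond
    obtain ⟨i, hi, hstart⟩ :=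
      (anchored_iff_isIn p.1 cs (rankTable_nonempty_keys p hp)).mpr hin
    refine ⟨(cs.drop i, p), ?_, hstart, hr⟩
    rw [List.mem_flatMap]
    exact ⟨i, hi, List.mem_map.mpr ⟨p, hp, rfl⟩⟩
  · rintro ⟨q, hq, hstart, hr⟩
    rw [List.mem_flatMap] at hq
    obtain ⟨i, hi, hq⟩ := hq
    obtain ⟨p, hp, rfl⟩ := List.mem_map.mp hq
    refine ⟨p, hp, ?_⟩
    rw [Bool.and_eq_true, beq_iff_eq]
    refine ⟨hr, ?_⟩
    exact (anchored_iff_isIn p.1 cs (rankTable_nonempty_keys p hp)).mp ⟨i, hi, hstart⟩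

-- the double fold of the port computes the least occurring rank (3 when none occurs)
theorem best_eq (cs : List Char) :
    ((List.range cs.length).foldl
      (fun b i => rankTable.foldl
        (fun b p => if p.2 < b && PySem.Chars.startswith (cs.drop i) p.1 then p.2 else b) b) 3)
    = if occB 0 cs then 0 else if occB 1 cs then 1 else if occB 2 cs then 2 else 3 := by
  have hL :
      ((List.range cs.length).foldl
        (fun b i => rankTable.foldl
          (fun b p => if p.2 < b && PySem.Chars.startswith (cs.drop i) p.1 then p.2 else b) b) 3)
      = ((List.range cs.length).flatMap (fun i => rankTable.map (fun p => (cs.drop i, p)))).foldl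
          (fun b q => if PySem.Chars.startswith q.1 q.2.1 then min b q.2.2 else b) 3 := by
    rw [List.foldl_flatMap]
    simp only [List.foldl_map, step_eq_min]
  rw [hL]
  obtain ⟨h1, h2, h3⟩ := foldl_condmin_spec
    (fun q : List Char × (List Char × Nat) => PySem.Chars.startswith q.1 q.2.1)
    (fun q => q.2.2)
    ((List.range cs.length).flatMap (fun i => rankTable.map (fun p => (cs.drop i, p)))) 3
  have hrk : ∀ q ∈ (List.range cs.length).flatMap (fun i => rankTable.map (fun p => (cs.drop i, p))),
      q.2.2 ≤ 2 := by
    intro q hq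
    rw [List.mem_flatMap] at hq
    obtain ⟨i, _, hq⟩ := hq
    obtain ⟨p, hp, rfl⟩ := List.mem_map.mp hq
    exact rankTable_rank_le p hp
  by_cases h0 : occB 0 cs = true
  · obtain ⟨q, hq, hP, hr⟩ := (occB_iff 0 cs).mp h0
    have := h2 q hq hP
    rw [if_pos h0]
    omega
  · rw [if_neg h0]
    rw [Bool.not_eq_true] at h0
    by_cases hv1 : occB 1 cs = true
    · obtain ⟨q, hq, hP, hr⟩ := (occB_iff 1 cs).mp hv1
      have hle := h2 q hq hP
      rw [if_pos hv1]
      rcases h3 with h | ⟨q', hq', hP', hval⟩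
      · omega
      · have : occB q'.2.2 cs = true := (occB_iff q'.2.2 cs).mpr ⟨q', hq', hP', rfl⟩
        have hne0 : q'.2.2 ≠ 0 := by
          intro h0'
          rw [h0'] at this
          rw [this] at h0; simp at h0
        omega
    · rw [if_neg hv1]
      rw [Bool.not_eq_true] at hv1
      by_cases hv2 : occB 2 cs = true
      · obtain ⟨q, hq, hP, hr⟩ := (occB_iff 2 cs).mp hv2
        have hle := h2 q hq hP
        rw [if_pos hv2]
        rcases h3 with h | ⟨q', hq', hP', hval⟩
        · omega
        · have hocc : occB q'.2.2 cs = true := (occB_iff q'.2.2 cs).mpr ⟨q', hq', hP', rfl⟩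
          have hne0 : q'.2.2 ≠ 0 := by
            intro h'
            rw [h'] at hocc; rw [hocc] at h0; simp at h0
          have hne1 : q'.2.2 ≠ 1 := by
            intro h'
            rw [h'] at hocc; rw [hocc] at hv1; simp at hv1
          omega
      · rw [if_neg hv2]
        rw [Bool.not_eq_true] at hv2
        rcases h3 with h | ⟨q', hq', hP', hval⟩
        · exact h
        · exfalso
          have hocc : occB q'.2.2 cs = true := (occB_iff q'.2.2 cs).mpr ⟨q', hq', hP', rfl⟩
          have := hrk q' hq'
          interval_cases h : q'.2.2 <;> simp_all

-- A's any-tests over its three keyword lists are the occB tests of B's table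
theorem cond0_eq (s : String) :
    (["bio", "organic", "food", "green", "vegeta", "fruit"].any fun k => PySem.Str.isIn k s)
      = occB 0 s.toList := by
  simp [occB, rankTable, PySem.Str.isIn]

theorem cond1_eq (s : String) :
    (["recycl", "plastic", "paper", "metal", "glass", "card", "bottle", "can"].any fun k => PySem.Str.isIn k s)
      = occB 1 s.toList := by
  simp [occB, rankTable, PySem.Str.isIn]

theorem cond2_eq (s : String) :
    (["hazard", "toxic", "battery", "chemical", "medical", "e-waste", "ewaste"].any fun k => PySem.Str.isIn k s)
      = occB 2 s.toList := by
  simp [occB, rankTable, PySem.Str.isIn]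

-- ===== VERDICT (by name: the statement is the Claim_ definition above) =====
theorem map_class_spec : Claim_equal_map_class := by
  intro raw _
  unfold Spec_map_class map_class map_class_alt
  simp only []
  set s := PySem.Str.strip (PySem.Str.lower raw) with hs
  rw [best_eq]
  by_cases h1 : s == "biodegradable"
  · rw [eq_of_beq h1]; decide
  · by_cases h2 : s == "recyclable"
    · rw [eq_of_beq h2]; decide
    · by_cases h3 : s == "hazardous"
      · rw [eq_of_beq h3]; decide
      · rw [Bool.not_eq_true] at h1 h2 h3
        rw [h1, h2, h3]
        rw [cond0_eq s, cond1_eq s, cond2_eq s]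
        simp only [Bool.false_or]
        by_cases c0 : occB 0 s.toList = true
        · rw [c0]; rfl
        · rw [Bool.not_eq_true] at c0
          rw [c0]
          by_cases c1 : occB 1 s.toList = true
          · rw [c1]; rfl
          · rw [Bool.not_eq_true] at c1
            rw [c1]
            by_cases c2 : occB 2 s.toList = true
            · rw [c2]; rfl
            · rw [Bool.not_eq_true] at c2
              rw [c2]; rfl
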